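-- pv_equiv track=rewrite | github.com/GuanYuGit/AGENTIC | Text_Stuff/davin/tools/media_extractor.py | _classify_domain_type
-- ===== SOURCE A (Python) =====
-- def _classify_domain_type(domain: str) -> str:
--     """Classify the type of domain"""
--     if any(keyword in domain for keyword in ['news', 'times', 'post', 'herald', 'guardian', 'asiaone', 'channelnewsasia']):
--         return "news_media"
--     elif any(keyword in domain for keyword in ['blog', 'medium', 'substack', 'wordpress']):
--         return "blog"
--     elif any(keyword in domain for keyword in ['shop', 'store', 'buy', 'market', 'ecommerce']):
--         return "ecommerce"
--     elif any(keyword in domain for keyword in ['edu', 'academic', 'university', 'school']):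
--         return "educational"
--     elif any(keyword in domain for keyword in ['gov', 'official']):
--         return "government"
--     else:
--         return "general"
-- ===== SOURCE B (Python) =====
-- # Naive multi-pattern text scan: walk the domain position by position, test every
-- # keyword as a prefix there, and keep the minimum category priority seen.
-- _LABELS = ["news_media", "blog", "ecommerce", "educational", "government", "general"]
-- _PATTERNS = [
--     ("news", 0), ("times", 0), ("post", 0), ("herald", 0), ("guardian", 0),
--     ("asiaone", 0), ("channelnewsasia", 0),
--     ("blog", 1), ("medium", 1), ("substack", 1), ("wordpress", 1),
--     ("shop", 2), ("store", 2), ("buy", 2), ("market", 2), ("ecommerce", 2),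
--     ("edu", 3), ("academic", 3), ("university", 3), ("school", 3),
--     ("gov", 4), ("official", 4),
-- ]
--
-- def _classify_domain_type(domain: str) -> str:
--     """Classify the type of domain"""
--     best = 5
--     for i in range(len(domain)):
--         for kw, cat in _PATTERNS:
--             if domain.startswith(kw, i) and cat < best:
--                 best = cat
--     return _LABELS[best]
-- ===== Notes on version B (the rewrite author's own statement) =====
-- stated objective: alternative
-- what changed: Replaces the per-keyword substring-membership if/elif chain with a naive multi-pattern text scan: one pass over the domain's positions testing each keyword as a prefix there, keeping the minimum category priority, with the label looked up from the priority at the end.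
import Mathlib
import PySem

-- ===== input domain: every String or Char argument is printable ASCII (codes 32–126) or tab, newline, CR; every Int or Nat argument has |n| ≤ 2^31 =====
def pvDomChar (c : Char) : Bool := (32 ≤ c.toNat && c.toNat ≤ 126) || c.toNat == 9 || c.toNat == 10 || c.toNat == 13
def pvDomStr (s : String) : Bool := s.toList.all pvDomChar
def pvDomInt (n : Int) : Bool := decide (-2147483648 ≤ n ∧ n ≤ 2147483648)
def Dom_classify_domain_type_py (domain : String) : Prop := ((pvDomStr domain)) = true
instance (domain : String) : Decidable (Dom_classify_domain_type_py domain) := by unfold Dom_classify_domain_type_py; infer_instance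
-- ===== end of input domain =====

-- B replaces A's if/elif keyword-membership chain by a naive multi-pattern text scan
-- (per-position prefix tests keeping the minimum category priority); same cost, alternative algorithm.

-- ===== PORT A =====
def classify_domain_type_py (domain : String) : String :=
  if (["news", "times", "post", "herald", "guardian", "asiaone", "channelnewsasia"]).any (fun keyword => PySem.Str.isIn keyword domain) then
    "news_media"
  else if (["blog", "medium", "substack", "wordpress"]).any (fun keyword => PySem.Str.isIn keyword domain) then
    "blog"
  else if (["shop", "store", "buy", "market", "ecommerce"]).any (fun keyword => PySem.Str.isIn keyword domain) then
    "ecommerce"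
  else if (["edu", "academic", "university", "school"]).any (fun keyword => PySem.Str.isIn keyword domain) then
    "educational"
  else if (["gov", "official"]).any (fun keyword => PySem.Str.isIn keyword domain) then
    "government"
  else
    "general"

-- ===== PORT B =====
def pvLabels : List String :=
  ["news_media", "blog", "ecommerce", "educational", "government", "general"]

def pvPatterns : List (String × Nat) :=
  [("news", 0), ("times", 0), ("post", 0), ("herald", 0), ("guardian", 0),
   ("asiaone", 0), ("channelnewsasia", 0),
   ("blog", 1), ("medium", 1), ("substack", 1), ("wordpress", 1),
   ("shop", 2), ("store", 2), ("buy", 2), ("market", 2), ("ecommerce", 2),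
   ("edu", 3), ("academic", 3), ("university", 3), ("school", 3),
   ("gov", 4), ("official", 4)]

-- the double loop: for i in range(len(domain)): for kw, cat in _PATTERNS: …
-- Python's domain.startswith(kw, i) with 0 ≤ i ≤ len(domain) is exactly
-- startswith on the i-dropped character list.
def pvBest (s : List Char) : Nat :=
  (List.range s.length).foldl
    (fun best i =>
      pvPatterns.foldl
        (fun b p =>
          if PySem.Chars.startswith (s.drop i) p.1.toList ∧ p.2 < b then p.2 else b)
        best)
    5

-- _LABELS[best]: best ≤ 5 always, so plain in-range indexing (exact).
def classify_domain_type_py_alt (domain : String) : String :=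
  pvLabels.getD (pvBest domain.toList) "general"

-- ===== PRECONDITION & SPEC =====
def Spec_classify_domain_type_py (domain : String) (out : String) : Prop := out = classify_domain_type_py_alt domain
instance (domain : String) (out : String) : Decidable (Spec_classify_domain_type_py domain out) := by unfold Spec_classify_domain_type_py; infer_instance

-- ===== CLAIM (what is proved, stated in full; the proofs are below) =====
def Claim_equal_classify_domain_type_py : Prop := ∀ (domain : String), Dom_classify_domain_type_py domain → Spec_classify_domain_type_py domain (classify_domain_type_py domain)

-- ===== LEMMAS AND PROOFS =====

-- each fold step only ever lowers the accumulator, so the fold result is ≤ its start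
theorem pv_foldl_dec {α : Type} (f : Nat → α → Nat) (hf : ∀ b x, f b x ≤ b) :
    ∀ (l : List α) (b : Nat), List.foldl f b l ≤ b := by
  intro l
  induction l with
  | nil => intro b; simp
  | cons x l ih => intro b; exact le_trans (ih (f b x)) (hf b x)

-- if some element of the list forces the step below c, the whole fold is ≤ c
theorem pv_foldl_bound {α : Type} (f : Nat → α → Nat) (hf : ∀ b x, f b x ≤ b)
    (c : Nat) (x : α) (hx : ∀ b, f b x ≤ c) :
    ∀ (l : List α) (b : Nat), x ∈ l → List.foldl f b l ≤ c := by
  intro l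
  induction l with
  | nil => intro b h; cases h
  | cons y l ih =>
      intro b h
      rcases List.mem_cons.mp h with rfl | h
      · exact le_trans (pv_foldl_dec f hf l (f b x)) (hx b)
      · exact ih (f b y) h
  -- (whichever branch)

-- the fold result is either the start value or a value justified by some element
theorem pv_foldl_cases {α : Type} (f : Nat → α → Nat) (W : α → Nat → Prop)
    (hf : ∀ b x, f b x = b ∨ W x (f b x)) :
    ∀ (l : List α) (b : Nat), List.foldl f b l = b ∨ ∃ x ∈ l, W x (List.foldl f b l) := by
  intro l
  induction l with
  | nil => intro b; left; rfl
  | cons x l ih =>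
      intro b
      rcases ih (f b x) with h | ⟨y, hy, hW⟩
      · rw [List.foldl_cons, h]
        rcases hf b x with h' | h'
        · exact Or.inl h'
        · exact Or.inr ⟨x, List.mem_cons_self, h'⟩
      · exact Or.inr ⟨y, List.mem_cons_of_mem _ hy, hW⟩

-- a keyword occurs somewhere in s iff it is a prefix at some position i < length
theorem pv_exists_lt_iff (s kw : List Char) (hkw : kw ≠ []) :
    (∃ i < s.length, kw <+: s.drop i) ↔ PySem.Chars.isIn kw s = true := by
  rw [← PySem.Chars.exists_prefix_drop_iff_isIn]
  constructor
  · rintro ⟨i, _, h⟩; exact ⟨i, h⟩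
  · rintro ⟨j, h⟩
    by_cases hj : j < s.length
    · exact ⟨j, hj, h⟩
    · exfalso
      rw [List.drop_eq_nil_of_le (le_of_not_gt hj)] at h
      exact hkw (List.prefix_nil.mp h)

-- matched patterns bound pvBest from above
theorem pv_best_le (s : List Char) (p : String × Nat) (hp : p ∈ pvPatterns)
    (hin : PySem.Chars.isIn p.1.toList s = true) : pvBest s ≤ p.2 := by
  have hne : p.1.toList ≠ [] := by
    revert hp; unfold pvPatterns; intro hp
    simp only [List.mem_cons, List.not_mem_nil, or_false] at hp
    rcases hp with rfl|rfl|rfl|rfl|rfl|rfl|rfl|rfl|rfl|rfl|rfl|rfl|rfl|rfl|rfl|rfl|rfl|rfl|rfl|rfl|rfl|rfl <;> decide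
  obtain ⟨i, hi, hpre⟩ := (pv_exists_lt_iff s p.1.toList hne).mpr hin
  unfold pvBest
  have hdec : ∀ (b : Nat) (j : Nat),
      pvPatterns.foldl (fun b q => if PySem.Chars.startswith (s.drop j) q.1.toList ∧ q.2 < b then q.2 else b) b ≤ b := by
    intro b j
    exact pv_foldl_dec _ (fun b q => by split <;> omega) _ _
  refine pv_foldl_bound _ (fun b j => hdec b j) p.2 i ?_ _ _ (List.mem_range.mpr hi)
  intro b
  refine pv_foldl_bound _ (fun b q => by split <;> omega) p.2 p ?_ _ _ hp
  intro b
  have hsw : PySem.Chars.startswith (s.drop i) p.1.toList = true :=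
    (PySem.Chars.startswith_iff _ _).mpr hpre
  split
  · omega
  · rename_i hcond
    simp only [hsw, true_and] at hcond
    omega

-- pvBest is 5 or the priority of some pattern occurring in s
theorem pv_best_cases (s : List Char) :
    pvBest s = 5 ∨ ∃ p ∈ pvPatterns, PySem.Chars.isIn p.1.toList s = true ∧ pvBest s = p.2 := by
  unfold pvBest
  have := pv_foldl_cases
    (fun best i => pvPatterns.foldl
        (fun b p => if PySem.Chars.startswith (s.drop i) p.1.toList ∧ p.2 < b then p.2 else b) best)
    (fun i v => ∃ p ∈ pvPatterns, PySem.Chars.isIn p.1.toList s = true ∧ v = p.2)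
    (fun b i => by
      have := pv_foldl_cases
        (fun b (p : String × Nat) => if PySem.Chars.startswith (s.drop i) p.1.toList ∧ p.2 < b then p.2 else b)
        (fun p v => PySem.Chars.isIn p.1.toList s = true ∧ v = p.2)
        (fun b p => by
          dsimp only
          split
          · rename_i h
            right
            refine ⟨?_, rfl⟩
            rw [← PySem.Chars.exists_prefix_drop_iff_isIn]
            exact ⟨i, (PySem.Chars.startswith_iff _ _).mp h.1⟩
          · left; rfl)
        pvPatterns b
      rcases this with h | ⟨p, hp, hW⟩
      · exact Or.inl h
      · exact Or.inr ⟨p, hp, hW⟩)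
    (List.range s.length) 5
  rcases this with h | ⟨i, _, h⟩
  · exact Or.inl h
  · exact Or.inr h

-- pvBest is 5 or equals some category index whose keyword group matches
theorem pv_best_groups (s : List Char) :
    pvBest s = 5 ∨
    (pvBest s = 0 ∧ (PySem.Chars.isIn "news".toList s = true ∨
      PySem.Chars.isIn "times".toList s = true ∨
      PySem.Chars.isIn "post".toList s = true ∨
      PySem.Chars.isIn "herald".toList s = true ∨
      PySem.Chars.isIn "guardian".toList s = true ∨
      PySem.Chars.isIn "asiaone".toList s = true ∨
      PySem.Chars.isIn "channelnewsasia".toList s = true)) ∨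
    (pvBest s = 1 ∧ (PySem.Chars.isIn "blog".toList s = true ∨
      PySem.Chars.isIn "medium".toList s = true ∨
      PySem.Chars.isIn "substack".toList s = true ∨
      PySem.Chars.isIn "wordpress".toList s = true)) ∨
    (pvBest s = 2 ∧ (PySem.Chars.isIn "shop".toList s = true ∨
      PySem.Chars.isIn "store".toList s = true ∨
      PySem.Chars.isIn "buy".toList s = true ∨
      PySem.Chars.isIn "market".toList s = true ∨
      PySem.Chars.isIn "ecommerce".toList s = true)) ∨
    (pvBest s = 3 ∧ (PySem.Chars.isIn "edu".toList s = true ∨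
      PySem.Chars.isIn "academic".toList s = true ∨
      PySem.Chars.isIn "university".toList s = true ∨
      PySem.Chars.isIn "school".toList s = true)) ∨
    (pvBest s = 4 ∧ (PySem.Chars.isIn "gov".toList s = true ∨
      PySem.Chars.isIn "official".toList s = true)) := by
  rcases pv_best_cases s with h5 | ⟨p, hp, hin, heq⟩
  · exact Or.inl h5
  · simp only [pvPatterns, List.mem_cons, List.not_mem_nil, or_false] at hp
    rcases hp with rfl|rfl|rfl|rfl|rfl|rfl|rfl|rfl|rfl|rfl|rfl|rfl|rfl|rfl|rfl|rfl|rfl|rfl|rfl|rfl|rfl|rfl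
    exacts [Or.inr (Or.inl ⟨heq, Or.inl hin⟩),
      Or.inr (Or.inl ⟨heq, Or.inr (Or.inl hin)⟩),
      Or.inr (Or.inl ⟨heq, Or.inr (Or.inr (Or.inl hin))⟩),
      Or.inr (Or.inl ⟨heq, Or.inr (Or.inr (Or.inr (Or.inl hin)))⟩),
      Or.inr (Or.inl ⟨heq, Or.inr (Or.inr (Or.inr (Or.inr (Or.inl hin))))⟩),
      Or.inr (Or.inl ⟨heq, Or.inr (Or.inr (Or.inr (Or.inr (Or.inr (Or.inl hin)))))⟩),
      Or.inr (Or.inl ⟨heq, Or.inr (Or.inr (Or.inr (Or.inr (Or.inr (Or.inr (hin))))))⟩),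
      Or.inr (Or.inr (Or.inl ⟨heq, Or.inl hin⟩)),
      Or.inr (Or.inr (Or.inl ⟨heq, Or.inr (Or.inl hin)⟩)),
      Or.inr (Or.inr (Or.inl ⟨heq, Or.inr (Or.inr (Or.inl hin))⟩)),
      Or.inr (Or.inr (Or.inl ⟨heq, Or.inr (Or.inr (Or.inr (hin)))⟩)),
      Or.inr (Or.inr (Or.inr (Or.inl ⟨heq, Or.inl hin⟩))),
      Or.inr (Or.inr (Or.inr (Or.inl ⟨heq, Or.inr (Or.inl hin)⟩))),
      Or.inr (Or.inr (Or.inr (Or.inl ⟨heq, Or.inr (Or.inr (Or.inl hin))⟩))),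
      Or.inr (Or.inr (Or.inr (Or.inl ⟨heq, Or.inr (Or.inr (Or.inr (Or.inl hin)))⟩))),
      Or.inr (Or.inr (Or.inr (Or.inl ⟨heq, Or.inr (Or.inr (Or.inr (Or.inr (hin))))⟩))),
      Or.inr (Or.inr (Or.inr (Or.inr (Or.inl ⟨heq, Or.inl hin⟩)))),
      Or.inr (Or.inr (Or.inr (Or.inr (Or.inl ⟨heq, Or.inr (Or.inl hin)⟩)))),
      Or.inr (Or.inr (Or.inr (Or.inr (Or.inl ⟨heq, Or.inr (Or.inr (Or.inl hin))⟩)))),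
      Or.inr (Or.inr (Or.inr (Or.inr (Or.inl ⟨heq, Or.inr (Or.inr (Or.inr (hin)))⟩)))),
      Or.inr (Or.inr (Or.inr (Or.inr (Or.inr (⟨heq, Or.inl hin⟩))))),
      Or.inr (Or.inr (Or.inr (Or.inr (Or.inr (⟨heq, Or.inr (hin)⟩)))))]

set_option maxHeartbeats 1000000 in
-- case split on A's five conditions; pvBest is pinned by the bound lemmas above
theorem classify_domain_type_py_spec : Claim_equal_classify_domain_type_py := by
  intro domain _
  unfold Spec_classify_domain_type_py classify_domain_type_py classify_domain_type_py_alt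
  have hmain := pv_best_groups domain.toList
  simp only [List.any_cons, List.any_nil, Bool.or_eq_true,
    PySem.Str.isIn_eq, Bool.false_eq_true, or_false]
  by_cases h0 : PySem.Chars.isIn "news".toList domain.toList = true ∨
      PySem.Chars.isIn "times".toList domain.toList = true ∨
      PySem.Chars.isIn "post".toList domain.toList = true ∨
      PySem.Chars.isIn "herald".toList domain.toList = true ∨
      PySem.Chars.isIn "guardian".toList domain.toList = true ∨
      PySem.Chars.isIn "asiaone".toList domain.toList = true ∨
      PySem.Chars.isIn "channelnewsasia".toList domain.toList = true
  · have hub : pvBest domain.toList ≤ 0 := by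
      rcases h0 with h|h|h|h|h|h|h
      exacts [pv_best_le _ ("news", 0) (by decide) h,
        pv_best_le _ ("times", 0) (by decide) h,
        pv_best_le _ ("post", 0) (by decide) h,
        pv_best_le _ ("herald", 0) (by decide) h,
        pv_best_le _ ("guardian", 0) (by decide) h,
        pv_best_le _ ("asiaone", 0) (by decide) h,
        pv_best_le _ ("channelnewsasia", 0) (by decide) h]
    have hbest : pvBest domain.toList = 0 := by
      rcases hmain with h5 | ⟨e, g⟩ | ⟨e, g⟩ | ⟨e, g⟩ | ⟨e, g⟩ | ⟨e, g⟩
      exacts [(by omega), (by omega), (by omega), (by omega), (by omega), (by omega)]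
    rw [if_pos h0, hbest]
    rfl
  ·
    by_cases h1 : PySem.Chars.isIn "blog".toList domain.toList = true ∨
        PySem.Chars.isIn "medium".toList domain.toList = true ∨
        PySem.Chars.isIn "substack".toList domain.toList = true ∨
        PySem.Chars.isIn "wordpress".toList domain.toList = true
    · have hub : pvBest domain.toList ≤ 1 := by
        rcases h1 with h|h|h|h
        exacts [pv_best_le _ ("blog", 1) (by decide) h,
          pv_best_le _ ("medium", 1) (by decide) h,
          pv_best_le _ ("substack", 1) (by decide) h,
          pv_best_le _ ("wordpress", 1) (by decide) h]
      have hbest : pvBest domain.toList = 1 := by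
        rcases hmain with h5 | ⟨e, g⟩ | ⟨e, g⟩ | ⟨e, g⟩ | ⟨e, g⟩ | ⟨e, g⟩
        exacts [(by omega), (by exact absurd g h0), (by omega), (by omega), (by omega), (by omega)]
      rw [if_neg h0, if_pos h1, hbest]
      rfl
    ·
      by_cases h2 : PySem.Chars.isIn "shop".toList domain.toList = true ∨
          PySem.Chars.isIn "store".toList domain.toList = true ∨
          PySem.Chars.isIn "buy".toList domain.toList = true ∨
          PySem.Chars.isIn "market".toList domain.toList = true ∨
          PySem.Chars.isIn "ecommerce".toList domain.toList = true
      · have hub : pvBest domain.toList ≤ 2 := by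
          rcases h2 with h|h|h|h|h
          exacts [pv_best_le _ ("shop", 2) (by decide) h,
            pv_best_le _ ("store", 2) (by decide) h,
            pv_best_le _ ("buy", 2) (by decide) h,
            pv_best_le _ ("market", 2) (by decide) h,
            pv_best_le _ ("ecommerce", 2) (by decide) h]
        have hbest : pvBest domain.toList = 2 := by
          rcases hmain with h5 | ⟨e, g⟩ | ⟨e, g⟩ | ⟨e, g⟩ | ⟨e, g⟩ | ⟨e, g⟩
          exacts [(by omega), (by exact absurd g h0), (by exact absurd g h1), (by omega), (by omega), (by omega)]
        rw [if_neg h0, if_neg h1, if_pos h2, hbest]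
        rfl
      ·
        by_cases h3 : PySem.Chars.isIn "edu".toList domain.toList = true ∨
            PySem.Chars.isIn "academic".toList domain.toList = true ∨
            PySem.Chars.isIn "university".toList domain.toList = true ∨
            PySem.Chars.isIn "school".toList domain.toList = true
        · have hub : pvBest domain.toList ≤ 3 := by
            rcases h3 with h|h|h|h
            exacts [pv_best_le _ ("edu", 3) (by decide) h,
              pv_best_le _ ("academic", 3) (by decide) h,
              pv_best_le _ ("university", 3) (by decide) h,
              pv_best_le _ ("school", 3) (by decide) h]
          have hbest : pvBest domain.toList = 3 := by
            rcases hmain with h5 | ⟨e, g⟩ | ⟨e, g⟩ | ⟨e, g⟩ | ⟨e, g⟩ | ⟨e, g⟩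
            exacts [(by omega), (by exact absurd g h0), (by exact absurd g h1), (by exact absurd g h2), (by omega), (by omega)]
          rw [if_neg h0, if_neg h1, if_neg h2, if_pos h3, hbest]
          rfl
        ·
          by_cases h4 : PySem.Chars.isIn "gov".toList domain.toList = true ∨
              PySem.Chars.isIn "official".toList domain.toList = true
          · have hub : pvBest domain.toList ≤ 4 := by
              rcases h4 with h|h
              exacts [pv_best_le _ ("gov", 4) (by decide) h,
                pv_best_le _ ("official", 4) (by decide) h]
            have hbest : pvBest domain.toList = 4 := by
              rcases hmain with h5 | ⟨e, g⟩ | ⟨e, g⟩ | ⟨e, g⟩ | ⟨e, g⟩ | ⟨e, g⟩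
              exacts [(by omega), (by exact absurd g h0), (by exact absurd g h1), (by exact absurd g h2), (by exact absurd g h3), (by omega)]
            rw [if_neg h0, if_neg h1, if_neg h2, if_neg h3, if_pos h4, hbest]
            rfl
          ·
            have hbest : pvBest domain.toList = 5 := by
              rcases hmain with h5 | ⟨e, g⟩ | ⟨e, g⟩ | ⟨e, g⟩ | ⟨e, g⟩ | ⟨e, g⟩
              exacts [h5, absurd g h0, absurd g h1, absurd g h2, absurd g h3, absurd g h4]
            rw [if_neg h0, if_neg h1, if_neg h2, if_neg h3, if_neg h4, hbest]
            rfl
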